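-- pv_equiv track=rewrite | github.com/amasibag/K-mers-and-subsequent-k-mers | kmer.py | find_kmers
-- ===== SOURCE A (Python) =====
-- def find_kmers(sequence, k):
--     """
--     Identify all substrings of size k and their subsequent substrings for a single sequence.
--
--     Args:
--     - sequence (str): The DNA sequence.
--     - k (int): The size of the substrings.
--
--     Returns:
--     - dict: A dictionary where keys are substrings and values are sets of subsequent substrings.
--     """
--     if len(sequence) < k:
--          raise ValueError("Sequence length is shorter than k.")  #Raise a ValueError if the sequence is shorter than k.
--
--     kmers = {}  # Initialize an empty dictionary to store the k-mers and their subsequent k-mers.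
--     for i in range(len(sequence) - k):  # Iterate over the sequence, up to the length minus k.
--         kmer = sequence[i:i + k]  # Extract a substring of length k starting at position i.
--         next_kmer = sequence[i + 1:i + k + 1]  # Extract the subsequent k-mer.
--         if kmer not in kmers:  # Check if the k-mer is already in the dictionary.
--             kmers[kmer] = set()  # If the k-mer is not in the dictionary, add it as a key with an empty set as its value.
--         if len(next_kmer) == k:  # Check if the length of the next k-mer is k.
--             kmers[kmer].add(next_kmer)  # Add the subsequent k-mer to the set of subsequent k-mers for the current k-mer.
--     return kmers  # Return the dictionary containing all k-mers and their subsequent k-mers.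
-- ===== SOURCE B (Python) =====
-- def find_kmers(sequence, k):
--     if len(sequence) < k:
--         raise ValueError("Sequence length is shorter than k.")
--     n = len(sequence) - k
--     keys = []
--     for i in range(n):
--         kmer = sequence[i:i + k]
--         if kmer not in keys:
--             keys.append(kmer)
--     return {key: {sequence[i + 1:i + k + 1] for i in range(n) if sequence[i:i + k] == key}
--             for key in keys}
-- ===== Notes on version B (the rewrite author's own statement) =====
-- stated objective: alternative
-- what changed: B replaces A's single incremental-dict pass by a two-stage group-by: it first collects the distinct k-mer keys in first-occurrence order, then builds the dict with one independent scan of the sequence per key collecting that key's successors (a per-key nested scan instead of one dict maintained across the loop); it trades an O(d) factor of extra scanning for the staged decomposition.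
-- outside the precondition, e.g. on find_kmers('ab', -1): A returns {'a': set(), '': set()}, B returns {'a': {''}, '': {''}}
import Mathlib
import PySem

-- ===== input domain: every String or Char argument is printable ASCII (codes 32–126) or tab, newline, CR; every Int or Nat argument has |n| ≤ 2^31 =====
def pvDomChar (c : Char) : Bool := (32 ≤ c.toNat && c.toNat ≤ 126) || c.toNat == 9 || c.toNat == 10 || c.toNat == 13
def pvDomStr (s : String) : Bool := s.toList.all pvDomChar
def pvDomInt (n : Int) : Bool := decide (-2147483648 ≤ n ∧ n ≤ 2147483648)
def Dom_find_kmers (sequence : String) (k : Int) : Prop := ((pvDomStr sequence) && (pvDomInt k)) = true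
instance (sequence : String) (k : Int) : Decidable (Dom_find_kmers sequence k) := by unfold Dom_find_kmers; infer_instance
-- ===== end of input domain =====

-- B replaces A's single incremental-dict pass by a two-stage group-by: collect the distinct
-- k-mer keys first, then one independent successor-collecting scan per key (objective: alternative).


-- ===== PORT A =====
-- literal transliteration of A's loop: for each i in range(len(sequence)-k),
-- slice the current k-mer and the next one, ensure the key, and add the next k-mer
-- if it has length k.  kmers[kmer].add(…) is ported as Dict.modify with default
-- Set.empty; the key is always present at that point, so the default is never used.
def find_kmers (sequence : String) (k : Int) : List (String × List String) :=
  ((PySem.List.pyRange 0 (PySem.Str.len sequence - k)).foldl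
    (fun (kmers : PySem.Dict String (PySem.Set String)) i =>
      let kmer := PySem.Str.slice sequence (some i) (some (i + k))
      let next_kmer := PySem.Str.slice sequence (some (i + 1)) (some (i + k + 1))
      let kmers := if kmers.contains kmer then kmers else kmers.insert kmer PySem.Set.empty
      if PySem.Str.len next_kmer = k then
        kmers.modify kmer PySem.Set.empty (fun s => PySem.Set.add s next_kmer)
      else kmers)
    PySem.Dict.empty).items

-- ===== PORT B =====
-- B: stage 1 collects the distinct k-mer keys in first-occurrence order (the Python
-- 'if kmer not in keys: keys.append(kmer)' loop is exactly PySem.Set.add); stage 2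
-- builds, for each key, the set of its successors by its own scan over all positions
-- (the set comprehension is a fold adding sequence[i+1:i+k+1] whenever the k-mer at i is the key).
def find_kmers_alt (sequence : String) (k : Int) : List (String × List String) :=
  let n := PySem.Str.len sequence - k
  let keys := (PySem.List.pyRange 0 n).foldl
    (fun (ks : PySem.Set String) i =>
      PySem.Set.add ks (PySem.Str.slice sequence (some i) (some (i + k))))
    PySem.Set.empty
  keys.map (fun key => (key,
    (PySem.List.pyRange 0 n).foldl
      (fun (s : PySem.Set String) i =>
        if PySem.Str.slice sequence (some i) (some (i + k)) = key then
          PySem.Set.add s (PySem.Str.slice sequence (some (i + 1)) (some (i + k + 1)))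
        else s)
      PySem.Set.empty))

-- ===== PRECONDITION & SPEC =====
-- Pre_ excludes len(sequence) < k, where A raises ValueError, and restricts to the
-- natural domain k ≥ 0 of a k-mer size: for k < 0 A still returns a value shaped by
-- Python's negative-slice wraparound (keys with empty sets) that is outside the
-- function's purpose, and B's group-by returns a different artifact there.
def Pre_find_kmers (sequence : String) (k : Int) : Prop :=
  0 ≤ k ∧ k ≤ PySem.Str.len sequence
instance (sequence : String) (k : Int) : Decidable (Pre_find_kmers sequence k) := by
  unfold Pre_find_kmers; infer_instance

def pvWitness_find_kmers : String × Int := ("ACGTAC", 2)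

def Spec_find_kmers (sequence : String) (k : Int) (out : List (String × List String)) : Prop := out = find_kmers_alt sequence k
instance (sequence : String) (k : Int) (out : List (String × List String)) : Decidable (Spec_find_kmers sequence k out) := by unfold Spec_find_kmers; infer_instance

-- ===== CLAIM (what is proved, stated in full; the proofs are below) =====
def Claim_equal_find_kmers : Prop := ∀ (sequence : String) (k : Int), Dom_find_kmers sequence k → Pre_find_kmers sequence k → Spec_find_kmers sequence k (find_kmers sequence k)

-- ===== LEMMAS AND PROOFS =====

-- ensuring a key before modify-with-the-same-default is redundant
lemma modify_after_ensure {κ ν : Type} [BEq κ] [LawfulBEq κ]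
    (d : PySem.Dict κ ν) (key : κ) (dflt : ν) (f : ν → ν) :
    PySem.Dict.modify (if d.contains key then d else d.insert key dflt) key dflt f
      = d.modify key dflt f := by
  by_cases h : d.contains key
  · simp [h]
  · have h' : d.contains key = false := by simpa using h
    rw [if_neg (by simp [h']), PySem.Dict.modify, PySem.Dict.modify,
      PySem.Dict.getD_insert_self, PySem.Dict.insert_insert_self,
      PySem.Dict.getD_of_not_contains d dflt h']

-- the value stored at `key` after the grouping fold is the fold over the pairs with that key
lemma getD_group (key : String) :
    ∀ (L : List (String × String)) (d : PySem.Dict String (PySem.Set String)),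
    (L.foldl (fun d p => d.modify p.1 PySem.Set.empty (fun s => PySem.Set.add s p.2)) d).getD
        key PySem.Set.empty
      = (L.filter (fun p => p.1 == key)).foldl (fun s p => PySem.Set.add s p.2)
          (d.getD key PySem.Set.empty)
  | [], d => rfl
  | p :: L, d => by
    rw [List.foldl_cons, getD_group key L, List.filter_cons]
    by_cases h : p.1 = key
    · simp [h, PySem.Dict.getD_modify_self]
    · have hb : (p.1 == key) = false := by simpa using h
      rw [PySem.Dict.getD_modify, if_neg (Ne.symm h), hb]
      simp

-- the grouping fold's items, as a map over the distinct keys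
lemma dict_group_items (L : List (String × String)) :
    (L.foldl (fun d p => d.modify p.1 PySem.Set.empty (fun s => PySem.Set.add s p.2))
        PySem.Dict.empty).items
      = (PySem.Set.ofList (L.map Prod.fst)).map (fun key => (key,
          (L.filter (fun p => p.1 == key)).foldl (fun s p => PySem.Set.add s p.2)
            PySem.Set.empty)) := by
  have hnd : (L.foldl (fun d p => d.modify p.1 PySem.Set.empty (fun s => PySem.Set.add s p.2))
      PySem.Dict.empty).keys.Nodup := by
    exact PySem.Dict.nodup_keys_foldl_modify_key L Prod.fst PySem.Set.empty
      (fun d x => fun s => PySem.Set.add s x.2) PySem.Dict.empty PySem.Dict.nodup_keys_empty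
  rw [PySem.Dict.items_eq_map_keys _ hnd PySem.Set.empty,
    PySem.Dict.keys_foldl_modify_key, PySem.Dict.keys_empty, PySem.Set.update_nil_left]
  refine List.map_congr_left ?_
  intro key _
  rw [getD_group, PySem.Dict.getD_empty]

-- ===== VERDICT (by name: the statement is the Claim_ definition above) =====
theorem find_kmers_spec : Claim_equal_find_kmers := by
  intro sequence k _hdom hpre
  unfold Pre_find_kmers at hpre
  unfold Spec_find_kmers
  obtain ⟨hk0, hkn⟩ := hpre
  unfold find_kmers find_kmers_alt
  rw [PySem.Str.len_eq] at hkn ⊢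
  set n := sequence.toList.length with hn
  set κ := k.toNat with hκ
  have hkκ : k = (κ : Int) := (Int.toNat_of_nonneg hk0).symm
  have hκn : κ ≤ n := by omega
  have h1 : (n : Int) - k = ((n - κ : Nat) : Int) := by omega
  set m := n - κ with hm
  rw [h1]
  dsimp only
  rw [PySem.List.pyRange_zero_natCast]
  simp only [List.foldl_map]
  -- the list of (k-mer, successor) pairs
  set L : List (String × String) := (List.range m).map (fun (j : Nat) =>
    (PySem.Str.slice sequence (some (j : Int)) (some ((j : Int) + k)),
     PySem.Str.slice sequence (some ((j : Int) + 1)) (some ((j : Int) + k + 1)))) with hL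
  -- A side: canonical grouping fold over L
  have hA : List.foldl
      (fun (kmers : PySem.Dict String (PySem.Set String)) (j : Nat) =>
        if PySem.Str.len (PySem.Str.slice sequence (some ((j : Int) + 1)) (some ((j : Int) + k + 1))) = k then
          (if kmers.contains (PySem.Str.slice sequence (some (j : Int)) (some ((j : Int) + k))) = true then kmers
           else kmers.insert (PySem.Str.slice sequence (some (j : Int)) (some ((j : Int) + k))) PySem.Set.empty).modify
            (PySem.Str.slice sequence (some (j : Int)) (some ((j : Int) + k))) PySem.Set.empty
            (fun s => PySem.Set.add s (PySem.Str.slice sequence (some ((j : Int) + 1)) (some ((j : Int) + k + 1))))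
        else
          if kmers.contains (PySem.Str.slice sequence (some (j : Int)) (some ((j : Int) + k))) = true then kmers
          else kmers.insert (PySem.Str.slice sequence (some (j : Int)) (some ((j : Int) + k))) PySem.Set.empty)
      PySem.Dict.empty (List.range m)
      = L.foldl (fun d p => d.modify p.1 PySem.Set.empty (fun s => PySem.Set.add s p.2))
          PySem.Dict.empty := by
    rw [hL, List.foldl_map]
    apply PySem.List.foldl_congr_mem
    intro acc j hj
    have hj' : j < m := List.mem_range.mp hj
    have hlen : ((PySem.List.slice sequence.toList (some ((j : Int) + 1))
        (some ((j : Int) + k + 1))).length : Int) = k := by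
      have e1 : ((j : Int) + 1) = ((j + 1 : Nat) : Int) := by push_cast; ring
      have e2 : ((j : Int) + k + 1) = ((j + κ + 1 : Nat) : Int) := by rw [hkκ]; push_cast; ring
      rw [e1, e2, PySem.List.length_slice, PySem.List.clampIdx_natCast, PySem.List.clampIdx_natCast]
      omega
    simp [hlen, modify_after_ensure]
  rw [hA, dict_group_items]
  -- B side: the keys stage builds exactly Set.ofList of the key list
  have hKeys : List.foldl
      (fun (ks : PySem.Set String) (j : Nat) =>
        PySem.Set.add ks (PySem.Str.slice sequence (some (j : Int)) (some ((j : Int) + k))))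
      PySem.Set.empty (List.range m)
      = PySem.Set.ofList (L.map Prod.fst) := by
    rw [← PySem.Set.update_map_eq_foldl_add, PySem.Set.update_empty, hL, List.map_map]
    rfl
  rw [hKeys]
  -- B side: each per-key scan is the filtered fold over L
  refine List.map_congr_left ?_
  intro key _
  refine congrArg (fun s => (key, s)) ?_
  rw [List.foldl_filter, hL, List.foldl_map]
  apply PySem.List.foldl_congr_mem
  intro acc j _
  by_cases h : PySem.Str.slice sequence (some (j : Int)) (some ((j : Int) + k)) = key
  · simp [h]
  · have hb : ((PySem.Str.slice sequence (some (j : Int)) (some ((j : Int) + k))) == key) = false := by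
      simpa using h
    simp [h, hb]
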